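-- pv_equiv track=rewrite | github.com/rotem1023/Extended-Introduction-to-Computer-Science | hw5.py | prefix_suffix_overlap_hash1
-- ===== SOURCE A (Python) =====
-- class Dict:
--     def __init__(self, m, hash_func=hash):
--         """ initial hash table, m empty entries """
--         self.table = [ [] for i in range(m)]
--         self.hash_mod = lambda x: hash_func(x) % m
--
--     def __repr__(self):
--         L = [self.table[i] for i in range(len(self.table))]
--         return "".join([str(i) + " " + str(L[i]) + "\n" for i in range(len(self.table))])
--
--     def insert(self, key, value):
--         """ insert key,value into table
--             Allow repetitions of keys """
--         i = self.hash_mod(key) #hash on key only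
--         item = [key, value]    #pack into one item
--         self.table[i].append(item)
--
--     def find(self, key):
--         i=self.hash_mod(key)
--         final=[]
--         for l in self.table[i]:
--             if l[0]==key:
--                 final.append(l[1])
--         return(final)
--
-- def prefix_suffix_overlap_hash1(lst, k):
--     m=len(lst)
--     dic=Dict(m)
--     for i in range(m):
--         dic.insert(lst[i][:k],i)
--     final=[]
--     for j in range(m):
--         last=lst[j][-k:]
--         match=dic.find(last)
--         for d in match:
--             if d !=j:
--                 final.append((d,j))
--     return(final)
-- ===== SOURCE B (Python) =====
-- def prefix_suffix_overlap_hash1(lst, k):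
--     return [(d, j)
--             for j, s in enumerate(lst)
--             for d, t in enumerate(lst)
--             if d != j and t[:k] == s[-k:]]
-- ===== Notes on version B (the rewrite author's own statement) =====
-- stated objective: simpler
-- what changed: Drops the hand-rolled hash-table class (build an index of all k-prefixes, then look up each k-suffix) and instead does a direct all-pairs scan as one flat comprehension comparing t[:k] against s[-k:].
import Mathlib
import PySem

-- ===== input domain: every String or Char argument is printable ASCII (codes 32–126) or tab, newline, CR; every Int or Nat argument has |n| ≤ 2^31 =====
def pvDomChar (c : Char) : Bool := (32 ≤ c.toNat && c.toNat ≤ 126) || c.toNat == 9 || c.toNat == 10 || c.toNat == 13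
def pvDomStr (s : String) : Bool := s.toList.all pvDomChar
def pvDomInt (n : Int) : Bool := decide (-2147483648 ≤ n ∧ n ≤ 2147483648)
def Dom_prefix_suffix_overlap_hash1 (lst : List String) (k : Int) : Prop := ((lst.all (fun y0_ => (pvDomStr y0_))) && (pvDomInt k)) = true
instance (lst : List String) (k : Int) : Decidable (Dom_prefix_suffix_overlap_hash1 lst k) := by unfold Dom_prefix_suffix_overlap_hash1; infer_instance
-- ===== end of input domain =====

-- B drops A's hand-rolled hash-table index (build buckets of k-prefixes, then look up each
-- k-suffix) in favour of a direct all-pairs comprehension; objective: simpler, not faster.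

-- ===== PORT A =====
-- Python's builtin `hash` on strings is ported as a concrete deterministic string hash.
-- This is exact for the function's VALUE: Dict.find filters its bucket by key equality,
-- so the returned list is the same for any hash function.
def pvHash (s : String) : Int := s.toList.foldl (fun a c => a * 31 + (c.toNat : Int)) 0

-- self.hash_mod(key) = hash(key) % m  (Python %: PySem.Int.mod)
def pvHashMod (m : Int) (s : String) : Int := PySem.Int.mod (pvHash s) m

-- Dict.insert: self.table[i].append([key, value])
def pvDictInsert (m : Int) (tb : List (List (String × Int))) (key : String) (v : Int) :
    List (List (String × Int)) :=
  tb.modify (pvHashMod m key).toNat (fun b => b ++ [(key, v)])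

-- Dict.find: scan bucket i, collect the values whose stored key equals `key`
def pvDictFind (m : Int) (tb : List (List (String × Int))) (key : String) : List Int :=
  (tb.getD (pvHashMod m key).toNat []).foldl
    (fun fin l => if l.1 == key then fin ++ [l.2] else fin) []

-- (pyGetD with default "": the index is always in range, so the default is never used)
def prefix_suffix_overlap_hash1 (lst : List String) (k : Int) : List (Int × Int) :=
  let m : Int := PySem.List.len lst
  let tb := (PySem.List.pyRange 0 m 1).foldl
    (fun tb i => pvDictInsert m tb (PySem.Str.slice (PySem.List.pyGetD lst i "") none (some k)) i)
    (List.replicate lst.length [])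
  (PySem.List.pyRange 0 m 1).foldl
    (fun fin j =>
      let last := PySem.Str.slice (PySem.List.pyGetD lst j "") (some (-k)) none
      let mtch := pvDictFind m tb last
      mtch.foldl (fun fin d => if d != j then fin ++ [(d, j)] else fin) fin)
    []

-- ===== PORT B =====
def prefix_suffix_overlap_hash1_alt (lst : List String) (k : Int) : List (Int × Int) :=
  (PySem.List.enumerate lst 0).flatMap (fun js =>
    (PySem.List.enumerate lst 0).filterMap (fun dt =>
      if dt.1 ≠ js.1 ∧ PySem.Str.slice dt.2 none (some k) = PySem.Str.slice js.2 (some (-k)) none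
      then some (dt.1, js.1) else none))

-- ===== PRECONDITION & SPEC =====
def Spec_prefix_suffix_overlap_hash1 (lst : List String) (k : Int) (out : List (Int × Int)) : Prop := out = prefix_suffix_overlap_hash1_alt lst k
instance (lst : List String) (k : Int) (out : List (Int × Int)) : Decidable (Spec_prefix_suffix_overlap_hash1 lst k out) := by unfold Spec_prefix_suffix_overlap_hash1; infer_instance

-- ===== CLAIM (what is proved, stated in full; the proofs are below) =====
def Claim_equal_prefix_suffix_overlap_hash1 : Prop := ∀ (lst : List String) (k : Int), Dom_prefix_suffix_overlap_hash1 lst k → Spec_prefix_suffix_overlap_hash1 lst k (prefix_suffix_overlap_hash1 lst k)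

-- ===== LEMMAS AND PROOFS =====

-- the bucket index hash(key) % m is in range when the table is nonempty
theorem pvHashMod_lt (m : Int) (hm : 0 < m) (s : String) :
    0 ≤ pvHashMod m s ∧ pvHashMod m s < m := by
  unfold pvHashMod PySem.Int.mod
  exact ⟨Int.fmod_nonneg_of_pos _ hm, Int.fmod_lt_of_pos _ hm⟩

theorem getD_modify {α : Type} (tb : List α) (i b : Nat) (f : α → α) (d : α) :
    (tb.modify i f).getD b d = if i = b ∧ b < tb.length then f (tb.getD b d) else tb.getD b d := by
  simp [List.getD_eq_getElem?_getD, List.getElem?_modify]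
  by_cases hb : b < tb.length
  · rw [List.getElem?_eq_getElem hb]
    by_cases hib : i = b <;> simp [hib, hb]
  · rw [List.getElem?_eq_none (by omega)]
    simp [hb]

-- table invariant: after inserting all pairs of P, bucket b holds exactly the pairs of P
-- whose key hashes to bucket b, in insertion order
theorem fold_insert_getD (m : Int) (n : Nat) (hm : m = (n : Int)) (hn : 0 < n)
    (P : List (String × Int)) :
    ∀ (tb : List (List (String × Int))), tb.length = n → ∀ (b : Nat),
      ((P.foldl (fun tb p => pvDictInsert m tb p.1 p.2) tb).getD b []) =
        tb.getD b [] ++ P.filter (fun p => (pvHashMod m p.1).toNat == b) := by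
  induction P with
  | nil => intro tb _ b; simp
  | cons p P ih =>
    intro tb hlen b
    have hmpos : 0 < m := by omega
    have hrange := pvHashMod_lt m hmpos p.1
    have hlt : (pvHashMod m p.1).toNat < n := by omega
    simp only [List.foldl_cons]
    rw [ih (pvDictInsert m tb p.1 p.2) (by simp [pvDictInsert, hlen]) b]
    rw [pvDictInsert, getD_modify, List.filter_cons]; rw [hlen]
    by_cases h : (pvHashMod m p.1).toNat = b
    · rw [if_pos ⟨h, by omega⟩]; simp [h]
    · simp [h]

-- find returns exactly the values inserted under an equal key, in insertion order
-- (keys equal ⇒ buckets equal, so the bucket filter is redundant)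
theorem find_fold_insert (m : Int) (n : Nat) (hm : m = (n : Int)) (hn : 0 < n)
    (P : List (String × Int)) (key : String) :
    pvDictFind m (P.foldl (fun tb p => pvDictInsert m tb p.1 p.2) (List.replicate n [])) key
      = (P.filter (fun p => p.1 == key)).map (·.2) := by
  unfold pvDictFind
  rw [fold_insert_getD m n hm hn P _ (by simp) _]
  rw [PySem.List.foldl_append_if (fun (l : String × Int) => l.1 == key) (fun (l : String × Int) => l.2)]
  have hrep : (List.replicate n ([] : List (String × Int))).getD (pvHashMod m key).toNat [] = [] := by
    simp
  rw [hrep]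
  simp only [List.nil_append, List.filter_filter]
  congr 1
  apply List.filter_congr
  intro p _
  by_cases h : p.1 = key <;> simp [h]

-- a comprehension's if-guard: filterMap over an ite is filter-then-map
theorem filterMap_if {α β : Type} (p : α → Prop) [DecidablePred p] (f : α → β) (l : List α) :
    (l.filterMap (fun x => if p x then some (f x) else none)) =
      (l.filter (fun x => decide (p x))).map f := by
  induction l with
  | nil => rfl
  | cons a t ih => by_cases h : p a <;> simp [h, ih]

theorem main_eq (lst : List String) (k : Int) :
    prefix_suffix_overlap_hash1 lst k = prefix_suffix_overlap_hash1_alt lst k := by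
  cases hl : lst with
  | nil => rfl
  | cons x t =>
  subst hl
  set lst := x :: t with hlst
  have hn : 0 < lst.length := by simp [hlst]
  simp only [prefix_suffix_overlap_hash1, prefix_suffix_overlap_hash1_alt]
  have hmap : PySem.List.pyRange 0 (PySem.List.len lst) 1 =
      (PySem.List.enumerate lst 0).map (fun e => e.1) := by
    rw [PySem.List.enumerate_eq_map_pyRange lst ""]
    simp [Function.comp_def]
  have hget : ∀ e ∈ PySem.List.enumerate lst 0, PySem.List.pyGetD lst e.1 "" = e.2 := by
    intro e he
    rw [PySem.List.mem_enumerate_iff] at he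
    obtain ⟨kk, hk, rfl⟩ := he
    simp [PySem.List.pyGetD_natCast, List.getD_eq_getElem?_getD, List.getElem?_eq_getElem hk]
  rw [hmap, List.foldl_map, List.foldl_map]
  rw [PySem.List.foldl_congr_mem _ _
      (fun tb (e : Int × String) =>
        pvDictInsert (PySem.List.len lst) tb (PySem.Str.slice e.2 none (some k)) e.1) _
      (by intro acc e he; rw [hget e he])]
  rw [PySem.List.foldl_congr_mem _ _
      (fun fin (e : Int × String) =>
        (pvDictFind (PySem.List.len lst)
          ((PySem.List.enumerate lst 0).foldl
            (fun tb e => pvDictInsert (PySem.List.len lst) tb (PySem.Str.slice e.2 none (some k)) e.1)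
            (List.replicate lst.length []))
          (PySem.Str.slice e.2 (some (-k)) none)).foldl
          (fun fin d => if d != e.1 then fin ++ [(d, e.1)] else fin) fin) _
      (by intro acc e he; simp only; rw [hget e he])]
  have hfoldP : (PySem.List.enumerate lst 0).foldl
      (fun tb e => pvDictInsert (PySem.List.len lst) tb (PySem.Str.slice e.2 none (some k)) e.1)
      (List.replicate lst.length [])
      = ((PySem.List.enumerate lst 0).map (fun e => (PySem.Str.slice e.2 none (some k), e.1))).foldl
          (fun tb p => pvDictInsert (PySem.List.len lst) tb p.1 p.2)
          (List.replicate lst.length []) := by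
    rw [List.foldl_map]
  rw [hfoldP]
  rw [PySem.List.foldl_congr_mem _ _
      (fun fin (e : Int × String) => fin ++
        (((((PySem.List.enumerate lst 0).map (fun e => (PySem.Str.slice e.2 none (some k), e.1))).filter
            (fun p => p.1 == PySem.Str.slice e.2 (some (-k)) none)).map (·.2)).filter
          (fun d => d != e.1)).map (fun d => (d, e.1))) _
      (by
        intro acc e _
        simp only
        rw [find_fold_insert _ lst.length (by simp) hn _ _]
        rw [PySem.List.foldl_append_if (fun (d : Int) => d != e.1) (fun d => (d, e.1))])]
  rw [PySem.List.foldl_append_eq_flatMap, List.nil_append]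
  congr 1
  funext js
  rw [filterMap_if (fun (dt : Int × String) =>
        dt.1 ≠ js.1 ∧ PySem.Str.slice dt.2 none (some k) = PySem.Str.slice js.2 (some (-k)) none)
      (fun dt => (dt.1, js.1))]
  simp only [List.filter_map, List.map_map, List.filter_filter]
  congr 1
  apply List.filter_congr
  intro e _
  by_cases h1 : e.1 = js.1 <;>
    by_cases h2 : PySem.Str.slice e.2 none (some k) = PySem.Str.slice js.2 (some (-k)) none <;>
    simp [h1, h2, Function.comp]

-- ===== VERDICT (by name: the statement is the Claim_ definition above) =====
theorem prefix_suffix_overlap_hash1_spec : Claim_equal_prefix_suffix_overlap_hash1 := by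
  intro lst k _
  unfold Spec_prefix_suffix_overlap_hash1
  exact main_eq lst k
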